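-- pv_equiv track=rewrite | github.com/flavioyuri/modProcesso | modProcesso/modProcesso.py | removeElementos
-- ===== SOURCE A (Python) =====
-- def removeElementos(lista1, lista2, estadosLista2, minimoIgual, inicio, fins):
--   if len(lista1) >= minimoIgual:
--     if len(lista1) < len(lista2):
--       iguais = []
--       for i in range(1, len(lista2)-len(lista1)):
--         igual = True
--         for j in range(len(lista1)):
--           if lista2[i + j] != lista1[j]:
--             igual = False
--             break
--           else:
--             if estadosLista2[i + j] != inicio and estadosLista2[i + j +1] not in fins:
--               iguais.append(lista1[j])
--             continue
--         if igual and len(iguais) >= minimoIgual and i > 0 and j < len(lista2):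
--           return True, i, j
--         elif not igual:
--           iguais = []
--
--     elif len(lista1) == len(lista2):
--       igual = True
--       for i in range(len(lista1)):
--         if lista1[i] != lista2[i]:
--           igual = False
--           break
--       if igual:
--         return True, 0, len(lista1)
--     else:
--       return False, None, None
--
--     return False, None, None
--   else:
--     return False, None, None
-- ===== SOURCE B (Python) =====
-- def removeElementos(lista1, lista2, estadosLista2, minimoIgual, inicio, fins):
--     n, m = len(lista1), len(lista2)
--     if n < minimoIgual or n > m:
--         return False, None, None
--     if n == m:
--         return (True, 0, n) if lista1 == lista2 else (False, None, None)
--     # n < m: prefix sums of the per-position state condition, so each candidate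
--     # window's count is an O(1) difference instead of a rescan.
--     finset = set(fins)
--     pref = [0] * m  # pref[k] = number of positions p < k satisfying the condition
--     for k in range(m - 1):
--         good = estadosLista2[k] != inicio and estadosLista2[k + 1] not in finset
--         pref[k + 1] = pref[k] + (1 if good else 0)
--     total = 0  # count accumulated over the current run of consecutive matching windows
--     for i in range(1, m - n):
--         if lista2[i:i + n] == lista1:
--             total += pref[i + n] - pref[i]
--             if total >= minimoIgual:
--                 return True, i, n - 1
--         else:
--             total = 0
--     return False, None, None
-- ===== Notes on version B (the rewrite author's own statement) =====
-- stated objective: alternative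
-- what changed: B replaces A's nested per-window element loop with the accumulating iguais list by a precomputed prefix-sum array of the per-position state condition (each window's count becomes an O(1) difference), a slice equality test per window, and an integer running total over the current run of matching windows.
-- outside the precondition, e.g. on removeElementos([1], [2, 3, 4], [], 1, 0, []): A returns (False, None, None), B raises IndexError
import Mathlib
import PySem

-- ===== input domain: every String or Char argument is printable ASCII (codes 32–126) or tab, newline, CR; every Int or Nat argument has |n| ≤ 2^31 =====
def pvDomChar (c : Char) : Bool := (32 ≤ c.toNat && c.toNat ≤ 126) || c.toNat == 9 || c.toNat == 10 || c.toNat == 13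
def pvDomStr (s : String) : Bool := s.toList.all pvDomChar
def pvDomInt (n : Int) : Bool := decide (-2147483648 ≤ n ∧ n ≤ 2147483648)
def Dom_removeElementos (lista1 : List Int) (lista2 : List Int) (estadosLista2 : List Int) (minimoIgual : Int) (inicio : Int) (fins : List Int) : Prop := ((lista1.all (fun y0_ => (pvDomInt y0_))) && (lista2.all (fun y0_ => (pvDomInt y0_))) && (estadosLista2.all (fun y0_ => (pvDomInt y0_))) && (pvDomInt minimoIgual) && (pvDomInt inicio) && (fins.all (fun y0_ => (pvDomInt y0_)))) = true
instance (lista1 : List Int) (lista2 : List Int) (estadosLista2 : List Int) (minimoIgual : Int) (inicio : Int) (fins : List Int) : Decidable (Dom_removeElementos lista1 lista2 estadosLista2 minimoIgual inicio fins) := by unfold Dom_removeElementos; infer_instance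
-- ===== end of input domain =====

-- B replaces A's nested window rescan + accumulating element list by a prefix-sum array of
-- the per-position state condition, slice comparison per window, and an integer running total
-- (objective: alternative algorithm, same cost; equal results proved on Pre_).

-- ===== PORT A =====
-- equal-length branch: 'for i: if lista1[i] != lista2[i]: break' (loop over paired elements)
def pvAeq : List Int → List Int → Bool
  | a :: as, b :: bs => if a ≠ b then false else pvAeq as bs
  | _, _ => true

-- inner 'for j in range(len(lista1))' loop; state = (igual, iguais, last value of j).
-- Indices are nonnegative and in range on Pre_, so List.getD is exact there.
def pvAinner (lista1 lista2 est : List Int) (inicio : Int) (fins : List Int) (i : Nat) :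
    List Nat → List Int → Nat → Bool × List Int × Nat
  | [], ig, jl => (true, ig, jl)
  | j :: js, ig, _ =>
      if lista2.getD (i + j) 0 ≠ lista1.getD j 0 then (false, ig, j)
      else
        pvAinner lista1 lista2 est inicio fins i js
          (if est.getD (i + j) 0 ≠ inicio ∧ est.getD (i + j + 1) 0 ∉ fins
            then ig ++ [lista1.getD j 0] else ig) j

-- outer 'for i in range(1, len(lista2)-len(lista1))' loop; iguais persists across iterations
def pvAouter (lista1 lista2 est : List Int) (inicio : Int) (fins : List Int) (minimoIgual : Int) :
    List Nat → List Int → Bool × Option Int × Option Int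
  | [], _ => (false, none, none)
  | i :: is, ig =>
      let r := pvAinner lista1 lista2 est inicio fins i (List.range lista1.length) ig 0
      if r.1 = true ∧ (r.2.1.length : Int) ≥ minimoIgual ∧ 0 < i ∧ r.2.2 < lista2.length then
        (true, some (i : Int), some (r.2.2 : Int))
      else if r.1 = false then pvAouter lista1 lista2 est inicio fins minimoIgual is []
      else pvAouter lista1 lista2 est inicio fins minimoIgual is r.2.1

def removeElementos (lista1 : List Int) (lista2 : List Int) (estadosLista2 : List Int) (minimoIgual : Int) (inicio : Int) (fins : List Int) : Bool × Option Int × Option Int :=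
  if (lista1.length : Int) ≥ minimoIgual then
    if lista1.length < lista2.length then
      -- range(1, len(lista2)-len(lista1)) = [1, …, len2-len1-1]
      pvAouter lista1 lista2 estadosLista2 inicio fins minimoIgual
        (List.range' 1 (lista2.length - lista1.length - 1)) []
    else if lista1.length = lista2.length then
      if pvAeq lista1 lista2 then (true, some 0, some (lista1.length : Int))
      else (false, none, none)
    else (false, none, none)
  else (false, none, none)

-- ===== PORT B =====
-- per-position state condition (Source B: estados[k] != inicio and estados[k+1] not in finset)
def pvGoodB (est : List Int) (inicio : Int) (finset : PySem.Set Int) (k : Nat) : Bool :=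
  decide (est.getD k 0 ≠ inicio) && !(PySem.Set.contains finset (est.getD (k + 1) 0))

-- prefix-sum list: pvPref … K has K+1 entries, entry k = number of good positions < k
def pvPref (est : List Int) (inicio : Int) (finset : PySem.Set Int) : Nat → List Int
  | 0 => [0]
  | k + 1 =>
      let p := pvPref est inicio finset k
      p ++ [p.getD k 0 + (if pvGoodB est inicio finset k then 1 else 0)]

-- scan of candidate starts with the running total over the current run of matching windows
def pvBscan (lista1 lista2 : List Int) (pref : List Int) (minimoIgual : Int) (n : Nat) :
    List Nat → Int → Bool × Option Int × Option Int
  | [], _ => (false, none, none)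
  | i :: is, total =>
      if PySem.List.slice lista2 (some (i : Int)) (some ((i : Int) + (n : Int))) = lista1 then
        let total' := total + (pref.getD (i + n) 0 - pref.getD i 0)
        if total' ≥ minimoIgual then (true, some (i : Int), some ((n : Int) - 1))
        else pvBscan lista1 lista2 pref minimoIgual n is total'
      else pvBscan lista1 lista2 pref minimoIgual n is 0

def removeElementos_alt (lista1 : List Int) (lista2 : List Int) (estadosLista2 : List Int) (minimoIgual : Int) (inicio : Int) (fins : List Int) : Bool × Option Int × Option Int :=
  if (lista1.length : Int) < minimoIgual ∨ lista2.length < lista1.length then (false, none, none)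
  else if lista1.length = lista2.length then
    if lista1 = lista2 then (true, some 0, some (lista1.length : Int)) else (false, none, none)
  else
    pvBscan lista1 lista2
      (pvPref estadosLista2 inicio (PySem.Set.ofList fins) (lista2.length - 1))
      minimoIgual lista1.length (List.range' 1 (lista2.length - lista1.length - 1)) 0

-- ===== PRECONDITION & SPEC =====
-- Pre_ excludes (a) inputs with estadosLista2 shorter than lista2 while lista1 is strictly
-- shorter than lista2 — there A raises IndexError as soon as a partial match reaches the
-- missing states, and whether it does depends on accidental match positions — and (b) the
-- degenerate empty lista1 with minimoIgual ≤ 0 and len(lista2) ≥ 2, on which A raises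
-- UnboundLocalError (the loop variable j is read before assignment).
def Pre_removeElementos (lista1 : List Int) (lista2 : List Int) (estadosLista2 : List Int) (minimoIgual : Int) (inicio : Int) (fins : List Int) : Prop :=
  (lista1.length < lista2.length → lista2.length ≤ estadosLista2.length) ∧
  (lista1 = [] → 0 < minimoIgual ∨ lista2.length ≤ 1)
instance (lista1 : List Int) (lista2 : List Int) (estadosLista2 : List Int) (minimoIgual : Int) (inicio : Int) (fins : List Int) : Decidable (Pre_removeElementos lista1 lista2 estadosLista2 minimoIgual inicio fins) := by unfold Pre_removeElementos; infer_instance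

def pvWitness_removeElementos : List Int × List Int × List Int × Int × Int × List Int :=
  ([1], [0, 1, 0], [0, 0, 0], 1, 5, [])

def Spec_removeElementos (lista1 : List Int) (lista2 : List Int) (estadosLista2 : List Int) (minimoIgual : Int) (inicio : Int) (fins : List Int) (out : Bool × Option Int × Option Int) : Prop := out = removeElementos_alt lista1 lista2 estadosLista2 minimoIgual inicio fins
instance (lista1 : List Int) (lista2 : List Int) (estadosLista2 : List Int) (minimoIgual : Int) (inicio : Int) (fins : List Int) (out : Bool × Option Int × Option Int) : Decidable (Spec_removeElementos lista1 lista2 estadosLista2 minimoIgual inicio fins out) := by unfold Spec_removeElementos; infer_instance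

-- ===== CLAIM (what is proved, stated in full; the proofs are below) =====
def Claim_equal_removeElementos : Prop := ∀ (lista1 : List Int) (lista2 : List Int) (estadosLista2 : List Int) (minimoIgual : Int) (inicio : Int) (fins : List Int), Dom_removeElementos lista1 lista2 estadosLista2 minimoIgual inicio fins → Pre_removeElementos lista1 lista2 estadosLista2 minimoIgual inicio fins → Spec_removeElementos lista1 lista2 estadosLista2 minimoIgual inicio fins (removeElementos lista1 lista2 estadosLista2 minimoIgual inicio fins)

-- ===== LEMMAS AND PROOFS =====

theorem pvAeq_iff (a b : List Int) (h : a.length = b.length) : pvAeq a b = true ↔ a = b := by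
  induction a generalizing b with
  | nil => cases b <;> simp [pvAeq] at h ⊢
  | cons x xs ih =>
    cases b with
    | nil => simp at h
    | cons y ys =>
      simp only [pvAeq, List.length_cons] at h ⊢
      by_cases hxy : x = y <;> simp [hxy, ih ys (by omega)]


-- inner loop returns igual = (every compared position of this window matched)
theorem pvAinner_fst (l1 l2 est : List Int) (inicio : Int) (fins : List Int) (i : Nat) :
    ∀ (b a : Nat) (ig : List Int) (jl : Nat),
      (pvAinner l1 l2 est inicio fins i (List.range' a b) ig jl).1 =
        (List.range' a b).all (fun j => l2.getD (i + j) 0 == l1.getD j 0) := by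
  intro b
  induction b with
  | zero => intro a ig jl; simp [pvAinner]
  | succ b ih =>
    intro a ig jl
    rw [List.range'_succ]
    by_cases h : l2[i + a]?.getD 0 = l1[a]?.getD 0
    · simp [pvAinner, List.getD, h, ih]
    · simp [pvAinner, List.getD, h]

-- on a fully matching window the inner loop appends exactly the filtered window elements
theorem pvAinner_match (l1 l2 est : List Int) (inicio : Int) (fins : List Int) (i : Nat) :
    ∀ (b a : Nat) (ig : List Int) (jl : Nat),
      (∀ j ∈ List.range' a b, l2.getD (i + j) 0 = l1.getD j 0) →
      pvAinner l1 l2 est inicio fins i (List.range' a b) ig jl =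
        (true,
         ig ++ ((List.range' a b).filter
           (fun j => decide (est.getD (i + j) 0 ≠ inicio ∧ est.getD (i + j + 1) 0 ∉ fins))).map
             (fun j => l1.getD j 0),
         if b = 0 then jl else a + b - 1) := by
  intro b
  induction b with
  | zero => intro a ig jl _; simp [pvAinner]
  | succ b ih =>
    intro a ig jl hm
    rw [List.range'_succ] at hm ⊢
    have ha : l2[i + a]?.getD 0 = l1[a]?.getD 0 := by
      simpa [List.getD] using hm a (by simp)
    have hrest : ∀ j ∈ List.range' (a + 1) b, l2.getD (i + j) 0 = l1.getD j 0 :=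
      fun j hj => hm j (by simp [hj])
    have step : pvAinner l1 l2 est inicio fins i (a :: List.range' (a + 1) b) ig jl =
        pvAinner l1 l2 est inicio fins i (List.range' (a + 1) b)
          (if est.getD (i + a) 0 ≠ inicio ∧ est.getD (i + a + 1) 0 ∉ fins
            then ig ++ [l1.getD a 0] else ig) a := by
      simp [pvAinner, List.getD, ha]
    rw [step, ih (a + 1)
      (if est.getD (i + a) 0 ≠ inicio ∧ est.getD (i + a + 1) 0 ∉ fins then ig ++ [l1.getD a 0] else ig)
      a hrest]
    by_cases hc : est.getD (i + a) 0 ≠ inicio ∧ est.getD (i + a + 1) 0 ∉ fins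
    · rw [if_pos hc,
        List.filter_cons_of_pos
          (p := fun j => decide (est.getD (i + j) 0 ≠ inicio ∧ est.getD (i + j + 1) 0 ∉ fins))
          (by simpa using hc),
        List.map_cons]
      have hjl : (if b = 0 then a else a + 1 + b - 1) = (if b + 1 = 0 then jl else a + (b + 1) - 1) := by
        split <;> split <;> omega
      rw [hjl, List.append_assoc, List.singleton_append]
    · rw [if_neg hc,
        List.filter_cons_of_neg
          (p := fun j => decide (est.getD (i + j) 0 ≠ inicio ∧ est.getD (i + j + 1) 0 ∉ fins))
          (by simpa using hc)]
      have hjl : (if b = 0 then a else a + 1 + b - 1) = (if b + 1 = 0 then jl else a + (b + 1) - 1) := by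
        split <;> split <;> omega
      rw [hjl]

-- the prefix-sum list: length and entries
theorem pvPref_length (est : List Int) (inicio : Int) (fs : PySem.Set Int) :
    ∀ K, (pvPref est inicio fs K).length = K + 1 := by
  intro K
  induction K with
  | zero => rfl
  | succ K ih => simp [pvPref, ih]

theorem pvPref_getD (est : List Int) (inicio : Int) (fs : PySem.Set Int) :
    ∀ K k, k ≤ K → (pvPref est inicio fs K).getD k 0 =
      ((List.range k).countP (pvGoodB est inicio fs) : Int) := by
  intro K
  induction K with
  | zero =>
    intro k hk
    interval_cases k
    simp [pvPref]
  | succ K ih =>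
    intro k hk
    rcases Nat.lt_or_ge k (K + 1) with h | h
    · simp only [pvPref]
      rw [List.getD_append _ _ _ _ (by rw [pvPref_length]; omega)]
      exact ih k (by omega)
    · have hk' : k = K + 1 := by omega
      subst hk'
      simp only [pvPref]
      rw [List.getD_append_right _ _ _ _ (by rw [pvPref_length]), pvPref_length]
      simp only [Nat.sub_self, List.getD_cons_zero]
      rw [ih K (by omega), List.range_succ, List.countP_append]
      by_cases hg : pvGoodB est inicio fs K = true <;> simp [hg]

-- slice equality is pointwise window equality
theorem window_eq_iff (l1 l2 : List Int) (i : Nat) (h : i + l1.length ≤ l2.length) :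
    ((l2.drop i).take l1.length = l1) ↔ ∀ j < l1.length, l2.getD (i + j) 0 = l1.getD j 0 := by
  constructor
  · intro he j hj
    have h0 := congrArg (fun l => List.getD l j (0 : Int)) he
    simp only [List.getD_eq_getElem?_getD, List.getElem?_take_of_lt hj, List.getElem?_drop] at h0
    simpa only [List.getD_eq_getElem?_getD] using h0
  · intro hp
    apply List.ext_getElem
    · simp
      omega
    · intro j h1 h2
      have hj : j < l1.length := h2
      have hij : i + j < l2.length := by omega
      have h0 := hp j hj
      rw [List.getD_eq_getElem?_getD, List.getD_eq_getElem?_getD,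
        List.getElem?_eq_getElem hij, List.getElem?_eq_getElem hj] at h0
      simp only [Option.getD_some] at h0
      simp [List.getElem_take, List.getElem_drop, h0]

-- the filtered window size equals the prefix-sum difference
theorem filterlen_eq (est : List Int) (inicio : Int) (fins : List Int) (i n : Nat) :
    ((((List.range n).filter
        (fun j => decide (est.getD (i + j) 0 ≠ inicio ∧ est.getD (i + j + 1) 0 ∉ fins))).length : Int))
      = ((List.range (i + n)).countP (pvGoodB est inicio (PySem.Set.ofList fins)) : Int)
        - ((List.range i).countP (pvGoodB est inicio (PySem.Set.ofList fins)) : Int) := by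
  rw [List.range_add, List.countP_append, List.countP_map]
  have hpt : ∀ j ∈ List.range n,
      ((pvGoodB est inicio (PySem.Set.ofList fins) ∘ (i + ·)) j = true) ↔
      ((fun j => decide (est.getD (i + j) 0 ≠ inicio ∧ est.getD (i + j + 1) 0 ∉ fins)) j = true) := by
    intro j _
    simp [pvGoodB, PySem.Set.mem_ofList]
  rw [List.countP_congr hpt, ← List.countP_eq_length_filter]
  push_cast
  ring

-- outer loop of A against prefix-sum scan of B: invariant total = len(iguais)
theorem outer_eq_scan (l1 l2 est : List Int) (inicio minimoIgual : Int) (fins : List Int)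
    (hn : 1 ≤ l1.length) (hnm : l1.length < l2.length) :
    ∀ (is : List Nat) (ig : List Int) (total : Int),
      (∀ i ∈ is, 1 ≤ i ∧ i + l1.length ≤ l2.length - 1) →
      total = (ig.length : Int) →
      pvAouter l1 l2 est inicio fins minimoIgual is ig =
        pvBscan l1 l2 (pvPref est inicio (PySem.Set.ofList fins) (l2.length - 1))
          minimoIgual l1.length is total := by
  intro is
  induction is with
  | nil => intro ig total _ _; simp [pvAouter, pvBscan]
  | cons i is ih =>
    intro ig total hb htot
    obtain ⟨hi1, hi2⟩ := hb i (List.mem_cons_self ..)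
    have hrest := fun j hj => hb j (List.mem_cons_of_mem _ hj)
    have hin : i + l1.length ≤ l2.length := by omega
    have hslice : PySem.List.slice l2 (some (i : Int)) (some ((i : Int) + (l1.length : Int)))
        = (l2.drop i).take l1.length := PySem.List.slice_natCast_add l2 i l1.length
    set pref := pvPref est inicio (PySem.Set.ofList fins) (l2.length - 1) with hprefdef
    have hpi : pref.getD i 0 = ((List.range i).countP (pvGoodB est inicio (PySem.Set.ofList fins)) : Int) :=
      pvPref_getD est inicio _ _ i (by omega)
    have hpin : pref.getD (i + l1.length) 0 =
        ((List.range (i + l1.length)).countP (pvGoodB est inicio (PySem.Set.ofList fins)) : Int) :=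
      pvPref_getD est inicio _ _ (i + l1.length) (by omega)
    by_cases hm : ∀ j < l1.length, l2.getD (i + j) 0 = l1.getD j 0
    · -- matching window
      have hm' : ∀ j ∈ List.range' 0 l1.length, l2.getD (i + j) 0 = l1.getD j 0 := by
        intro j hj
        exact hm j (by have := List.mem_range'_1.mp hj; omega)
      have hBmatch : PySem.List.slice l2 (some (i : Int)) (some ((i : Int) + (l1.length : Int))) = l1 := by
        rw [hslice, window_eq_iff l1 l2 i hin]
        exact hm
      set W := ((List.range' 0 l1.length).filter
        (fun j => decide (est.getD (i + j) 0 ≠ inicio ∧ est.getD (i + j + 1) 0 ∉ fins))).map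
          (fun j => l1.getD j 0) with hW
      have hr : pvAinner l1 l2 est inicio fins i (List.range l1.length) ig 0 =
          (true, ig ++ W, l1.length - 1) := by
        rw [List.range_eq_range', pvAinner_match l1 l2 est inicio fins i l1.length 0 ig 0 hm',
          if_neg (by omega : ¬ l1.length = 0), ← hW]
        simp only [Nat.zero_add]
      have hWlen : (W.length : Int) = pref.getD (i + l1.length) 0 - pref.getD i 0 := by
        rw [hpi, hpin, hW, List.length_map, ← List.range_eq_range']
        exact filterlen_eq est inicio fins i l1.length
      have htot' : total + (pref.getD (i + l1.length) 0 - pref.getD i 0) = ((ig ++ W).length : Int) := by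
        rw [← hWlen, htot]
        simp only [List.length_append]
        push_cast
        ring
      have hAstep : pvAouter l1 l2 est inicio fins minimoIgual (i :: is) ig =
          (if ((ig ++ W).length : Int) ≥ minimoIgual
            then ((true, some (i : Int), some ((l1.length : Int) - 1)) : Bool × Option Int × Option Int)
            else pvAouter l1 l2 est inicio fins minimoIgual is (ig ++ W)) := by
        simp only [pvAouter, hr]
        by_cases hge : ((ig ++ W).length : Int) ≥ minimoIgual
        · rw [if_pos hge,
            if_pos (⟨by trivial, hge, by omega, by show l1.length - 1 < l2.length; omega⟩ :
              _ ∧ _ ∧ _ ∧ _)]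
          have hcast : ((l1.length - 1 : Nat) : Int) = (l1.length : Int) - 1 := by omega
          rw [hcast]
        · rw [if_neg (by rintro ⟨-, hcontr, -, -⟩; exact hge hcontr),
            if_neg (by simp), if_neg hge]
      have hBstep : pvBscan l1 l2 pref minimoIgual l1.length (i :: is) total =
          (if ((ig ++ W).length : Int) ≥ minimoIgual
            then ((true, some (i : Int), some ((l1.length : Int) - 1)) : Bool × Option Int × Option Int)
            else pvBscan l1 l2 pref minimoIgual l1.length is (((ig ++ W).length : Nat) : Int)) := by
        simp only [pvBscan, if_pos hBmatch, htot']
      rw [hAstep, hBstep]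
      by_cases hge : ((ig ++ W).length : Int) ≥ minimoIgual
      · rw [if_pos hge, if_pos hge]
      · rw [if_neg hge, if_neg hge]
        exact ih (ig ++ W) _ hrest rfl
    · -- mismatching window: igual is false, both sides reset and recurse
      have hA1 : (pvAinner l1 l2 est inicio fins i (List.range l1.length) ig 0).1 = false := by
        rw [List.range_eq_range', pvAinner_fst]
        rw [not_forall] at hm
        simp only [not_forall, exists_prop] at hm
        obtain ⟨j, hj, hne⟩ := hm
        refine List.all_eq_false.mpr ⟨j, ?_, by simpa using hne⟩
        simp [List.mem_range'_1]
        omega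
      have hBmiss : ¬ PySem.List.slice l2 (some (i : Int)) (some ((i : Int) + (l1.length : Int))) = l1 := by
        rw [hslice]
        intro hcontr
        exact hm ((window_eq_iff l1 l2 i hin).mp hcontr)
      simp only [pvAouter, pvBscan, if_neg hBmiss]
      rw [if_neg (by rintro ⟨hcontr, -⟩; rw [hA1] at hcontr; exact Bool.false_ne_true hcontr),
        if_pos hA1]
      exact ih [] 0 hrest (by simp)

theorem removeElementos_spec : Claim_equal_removeElementos := by
  intro l1 l2 est mi ini fins _ hpre
  obtain ⟨hest, hemp⟩ := hpre
  unfold Spec_removeElementos removeElementos removeElementos_alt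
  by_cases h1 : (l1.length : Int) ≥ mi
  · rw [if_pos h1]
    by_cases h2 : l1.length < l2.length
    · rw [if_pos h2, if_neg (show ¬ ((l1.length : Int) < mi ∨ l2.length < l1.length) by omega),
        if_neg (show ¬ l1.length = l2.length by omega)]
      rcases Nat.eq_zero_or_pos l1.length with hn0 | hn
      · have hm1 : l2.length ≤ 1 := by
          rcases hemp (List.length_eq_zero_iff.mp hn0) with hmi | hle
          · omega
          · exact hle
        have hz : l2.length - l1.length - 1 = 0 := by omega
        rw [hz]
        simp [pvAouter, pvBscan]
      · refine outer_eq_scan l1 l2 est ini mi fins hn h2 _ [] 0 ?_ (by simp)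
        intro j hj
        have := List.mem_range'_1.mp hj
        omega
    · rw [if_neg h2]
      by_cases h3 : l1.length = l2.length
      · rw [if_pos h3, if_neg (show ¬ ((l1.length : Int) < mi ∨ l2.length < l1.length) by omega),
          if_pos h3]
        by_cases h4 : pvAeq l1 l2 = true
        · rw [if_pos h4, if_pos ((pvAeq_iff l1 l2 h3).mp h4)]
        · rw [if_neg h4, if_neg (fun hc => h4 ((pvAeq_iff l1 l2 h3).mpr hc))]
      · rw [if_neg h3, if_pos (Or.inr (by omega))]
  · rw [if_neg h1, if_pos (Or.inl (by omega))]
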